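-- pv_equiv track=rewrite | github.com/153079019shariq/ATPG_Sequential | Gates.py | AND_gate
-- ===== SOURCE A (Python) =====
-- def AND_gate(list_input):
-- 	flag =0
--
-- 	for input1 in list_input:
-- 			if(input1=='0'):			#Controlling_value
-- 				return '0'
-- 			else:
-- 				if(input1=='x'):
-- 					flag =1
--
-- 	if(flag==1):
-- 		return 'x'
-- 	else:
-- 		return '1' 						#All input is '1'
-- ===== SOURCE B (Python) =====
-- def AND_gate(list_input):
--     # Prioritized membership checks instead of a flag-carrying loop.
--     if '0' in list_input:
--         return '0'
--     if 'x' in list_input: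
--         return 'x'
--     return '1'
-- ===== Notes on version B (the rewrite author's own statement) =====
-- stated objective: simpler
-- what changed: Replaces the single loop maintaining an x-seen flag with two prioritized membership tests ('0' in list, then 'x' in list).
import Mathlib
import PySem

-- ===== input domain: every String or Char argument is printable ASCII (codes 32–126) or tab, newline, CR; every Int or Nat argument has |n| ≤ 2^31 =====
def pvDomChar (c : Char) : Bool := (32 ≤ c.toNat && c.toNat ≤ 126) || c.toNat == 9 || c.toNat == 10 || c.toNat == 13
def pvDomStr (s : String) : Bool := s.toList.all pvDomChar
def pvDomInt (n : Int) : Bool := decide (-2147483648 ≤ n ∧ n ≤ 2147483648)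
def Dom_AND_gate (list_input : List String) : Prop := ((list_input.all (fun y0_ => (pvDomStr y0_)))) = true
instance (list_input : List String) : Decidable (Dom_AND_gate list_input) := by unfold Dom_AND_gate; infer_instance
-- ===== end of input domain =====

-- B replaces A's flag-carrying loop with two prioritized membership checks (objective: simpler).


-- ===== PORT A =====
-- flag loop: returns '0' on first '0', sets flag on 'x'
def AND_gate_loop (flag : Nat) : List String → String
  | [] => if flag = 1 then "x" else "1"
  | input1 :: rest =>
      if input1 = "0" then "0"
      else if input1 = "x" then AND_gate_loop 1 rest
      else AND_gate_loop flag rest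

def AND_gate (list_input : List String) : String :=
  AND_gate_loop 0 list_input

-- ===== PORT B =====
def AND_gate_alt (list_input : List String) : String :=
  if "0" ∈ list_input then "0"
  else if "x" ∈ list_input then "x"
  else "1"

-- ===== PRECONDITION & SPEC =====
def Spec_AND_gate (list_input : List String) (out : String) : Prop := out = AND_gate_alt list_input
instance (list_input : List String) (out : String) : Decidable (Spec_AND_gate list_input out) := by unfold Spec_AND_gate; infer_instance

-- ===== CLAIM (what is proved, stated in full; the proofs are below) =====
def Claim_equal_AND_gate : Prop := ∀ (list_input : List String), Dom_AND_gate list_input → Spec_AND_gate list_input (AND_gate list_input)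

-- ===== LEMMAS AND PROOFS =====

-- ===== VERDICT (by name: the statement is the Claim_ definition above) =====
theorem AND_gate_loop_eq (flag : Nat) (l : List String) :
    AND_gate_loop flag l =
      if "0" ∈ l then "0"
      else if "x" ∈ l ∨ flag = 1 then "x" else "1" := by
  induction l generalizing flag with
  | nil => simp [AND_gate_loop]
  | cons h t ih =>
      by_cases h0 : h = "0"
      · simp [AND_gate_loop, h0]
      · by_cases hx : h = "x"
        · simp [AND_gate_loop, hx, ih]
        · have h0' : ¬("0" = h) := fun e => h0 e.symm
          have hx' : ¬("x" = h) := fun e => hx e.symm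
          simp [AND_gate_loop, h0, hx, ih, h0', hx']

theorem AND_gate_spec : Claim_equal_AND_gate := by
  intro l _
  unfold Spec_AND_gate AND_gate AND_gate_alt
  rw [AND_gate_loop_eq]
  simp
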